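-- pv_equiv track=rewrite | github.com/zayamatias/retrotool | retrofunctions.py | getSplits
-- ===== SOURCE A (Python) =====
-- def getSplits(csprites):
--     #returns the number of sprites that have to be created as a result of the split
--
--
--     splits = 0
--     numcols = 0
--     for cols in csprites:
--         if numcols < len(cols):
--                 numcols = len(cols)
--         if numcols > 0:
--             splits = 1
--         if numcols > 1:
--             splits = 2
--         if numcols > 2:
--             splits = 2
--     return splits
-- ===== SOURCE B (Python) =====
-- def getSplits(csprites):
--     # stateless version: two existence checks instead of a running maximum
--     if any(len(cols) > 1 for cols in csprites):
--         return 2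
--     if any(len(cols) > 0 for cols in csprites):
--         return 1
--     return 0
-- ===== Notes on version B (the rewrite author's own statement) =====
-- stated objective: simpler
-- what changed: Replaced the running-maximum accumulator and if-cascade with two stateless short-circuiting existence checks over the column lists.
import Mathlib
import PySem

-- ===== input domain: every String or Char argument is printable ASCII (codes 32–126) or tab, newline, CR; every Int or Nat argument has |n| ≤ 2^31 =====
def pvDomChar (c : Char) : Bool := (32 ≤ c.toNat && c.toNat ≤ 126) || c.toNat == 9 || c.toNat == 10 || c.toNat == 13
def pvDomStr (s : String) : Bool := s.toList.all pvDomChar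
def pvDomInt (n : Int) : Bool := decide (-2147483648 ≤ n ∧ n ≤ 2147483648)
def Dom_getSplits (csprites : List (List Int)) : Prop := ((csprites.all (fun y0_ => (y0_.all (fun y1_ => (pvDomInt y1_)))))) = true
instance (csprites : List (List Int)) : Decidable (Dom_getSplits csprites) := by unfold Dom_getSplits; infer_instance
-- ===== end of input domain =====

-- B replaces A's running-maximum accumulator and if-cascade with two stateless existence checks (objective: simpler).

-- ===== PORT A =====
-- one iteration of A's for-loop over state (splits, numcols)
def getSplitsStep (st : Int × Int) (cols : List Int) : Int × Int :=
  let numcols := if st.2 < (cols.length : Int) then (cols.length : Int) else st.2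
  let splits := if numcols > 0 then 1 else st.1
  let splits := if numcols > 1 then 2 else splits
  let splits := if numcols > 2 then 2 else splits
  (splits, numcols)

def getSplits (csprites : List (List Int)) : Int :=
  (csprites.foldl getSplitsStep (0, 0)).1

-- ===== PORT B =====
def getSplits_alt (csprites : List (List Int)) : Int :=
  if csprites.any (fun cols => cols.length > 1) then 2
  else if csprites.any (fun cols => cols.length > 0) then 1
  else 0

-- ===== PRECONDITION & SPEC =====
def Spec_getSplits (csprites : List (List Int)) (out : Int) : Prop := out = getSplits_alt csprites
instance (csprites : List (List Int)) (out : Int) : Decidable (Spec_getSplits csprites out) := by unfold Spec_getSplits; infer_instance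

-- ===== CLAIM (what is proved, stated in full; the proofs are below) =====
def Claim_equal_getSplits : Prop := ∀ (csprites : List (List Int)), Dom_getSplits csprites → Spec_getSplits csprites (getSplits csprites)

-- ===== LEMMAS AND PROOFS =====

-- A's loop from a self-consistent state (splits determined by numcols) computes B's answer over the tail.
theorem getSplits_fold_inv (l : List (List Int)) (n : Int) (hn : 0 ≤ n) :
    (l.foldl getSplitsStep ((if 1 < n then 2 else if 0 < n then 1 else 0), n)).1
      = if l.any (fun cols => cols.length > 1) then 2
        else if 1 < n then 2
        else if l.any (fun cols => cols.length > 0) then 1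
        else if 0 < n then 1 else 0 := by
  induction l generalizing n with
  | nil => simp
  | cons c t ih =>
    have hstep : getSplitsStep ((if 1 < n then 2 else if 0 < n then 1 else 0), n) c
        = ((if 1 < (if n < (c.length : Int) then (c.length : Int) else n) then 2
            else if 0 < (if n < (c.length : Int) then (c.length : Int) else n) then 1 else 0),
           (if n < (c.length : Int) then (c.length : Int) else n)) := by
      simp only [getSplitsStep, Prod.mk.injEq]
      split_ifs <;> refine ⟨by omega, trivial⟩
    set m : Int := if n < (c.length : Int) then (c.length : Int) else n with hm
    have hm0 : 0 ≤ m := by rw [hm]; split_ifs <;> omega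
    simp only [List.foldl_cons, hstep, ih m hm0, List.any_cons]
    have hcl : (0:Int) ≤ (c.length : Int) := by positivity
    by_cases h1 : 1 < c.length <;> by_cases h0 : 0 < c.length <;>
      simp [h1, h0] <;> split_ifs <;> first | rfl | omega

-- ===== VERDICT (by name: the statement is the Claim_ definition above) =====
theorem getSplits_spec : Claim_equal_getSplits := by
  intro csprites _
  show getSplits csprites = getSplits_alt csprites
  have h := getSplits_fold_inv csprites 0 le_rfl
  simp only [getSplits, getSplits_alt]
  simpa using h
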